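-- pv_equiv track=rewrite | github.com/an0mium/aragora | aragora/rlm/repl.py | _contains_blocked_dunder
-- ===== SOURCE A (Python) =====
-- def _contains_blocked_dunder(value: str) -> bool:
--     """
--     Check if a string contains blocked dunder names.
--
--     This catches both direct strings and concatenation results.
--     """
--     blocked = {
--         "__globals__",
--         "__builtins__",
--         "__code__",
--         "__closure__",
--         "__class__",
--         "__bases__",
--         "__subclasses__",
--         "__mro__",
--         "__dict__",
--         "__module__",
--         "__name__",
--         "__qualname__",
--         "__func__",
--         "__self__",
--         "__wrapped__",
--         "__annotations__",
--         "__init_subclass__",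
--         "__reduce__",
--         "__reduce_ex__",
--         "__getattribute__",
--         "__setattr__",
--         "__delattr__",
--     }
--     value_lower = value.lower()
--     return any(b in value_lower for b in blocked)
-- ===== SOURCE B (Python) =====
-- _BLOCKED = (
--     "__globals__", "__builtins__", "__code__", "__closure__", "__class__",
--     "__bases__", "__subclasses__", "__mro__", "__dict__", "__module__",
--     "__name__", "__qualname__", "__func__", "__self__", "__wrapped__",
--     "__annotations__", "__init_subclass__", "__reduce__", "__reduce_ex__",
--     "__getattribute__", "__setattr__", "__delattr__",
-- )
--
--
-- def _contains_blocked_dunder(value: str) -> bool: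
--     # Position-major single pass: at each index, test all blocked names at
--     # once via str.startswith with a tuple, instead of one full substring
--     # scan per blocked name.
--     v = value.lower()
--     return any(v.startswith(_BLOCKED, i) for i in range(len(v)))
-- ===== Notes on version B (the rewrite author's own statement) =====
-- stated objective: alternative
-- what changed: Replaced the name-major loop (one full substring scan per blocked name) with a position-major single pass over the string that tests all blocked names at each index via str.startswith with a tuple.
import Mathlib
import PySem

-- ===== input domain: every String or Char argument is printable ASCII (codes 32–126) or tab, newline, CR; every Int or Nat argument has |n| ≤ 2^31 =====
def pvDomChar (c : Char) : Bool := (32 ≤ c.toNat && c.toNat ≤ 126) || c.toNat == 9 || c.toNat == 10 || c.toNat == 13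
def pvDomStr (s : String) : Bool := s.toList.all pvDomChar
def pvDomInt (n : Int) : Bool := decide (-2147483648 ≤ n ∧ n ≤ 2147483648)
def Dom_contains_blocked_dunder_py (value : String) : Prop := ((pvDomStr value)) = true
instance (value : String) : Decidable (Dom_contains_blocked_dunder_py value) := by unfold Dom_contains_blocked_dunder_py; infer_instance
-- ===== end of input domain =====

-- B replaces A's name-major loop (one substring scan per blocked name) by a
-- position-major single pass testing all blocked names at each index (alternative).

-- ===== PORT A =====
-- A's set literal of blocked names
def pvBlockedNames : List String :=
  ["__globals__",
   "__builtins__",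
   "__code__",
   "__closure__",
   "__class__",
   "__bases__",
   "__subclasses__",
   "__mro__",
   "__dict__",
   "__module__",
   "__name__",
   "__qualname__",
   "__func__",
   "__self__",
   "__wrapped__",
   "__annotations__",
   "__init_subclass__",
   "__reduce__",
   "__reduce_ex__",
   "__getattribute__",
   "__setattr__",
   "__delattr__"]

def contains_blocked_dunder_py (value : String) : Bool :=
  let blocked := PySem.Set.ofList pvBlockedNames
  let value_lower := PySem.Str.lower value
  blocked.any (fun b => PySem.Str.isIn b value_lower)

-- ===== PORT B =====
-- B's tuple of blocked names, as a list of char lists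
def pvBlockedAlt : List (List Char) := pvBlockedNames.map String.toList

def contains_blocked_dunder_py_alt (value : String) : Bool :=
  let v := (PySem.Str.lower value).toList
  -- any(v.startswith(_BLOCKED, i) for i in range(len(v)));
  -- v.startswith(tuple, i) = some name is a prefix of v at position i
  (List.range v.length).any (fun i =>
    pvBlockedAlt.any (fun b => PySem.Chars.startswith (v.drop i) b))

-- ===== PRECONDITION & SPEC =====
def Spec_contains_blocked_dunder_py (value : String) (out : Bool) : Prop := out = contains_blocked_dunder_py_alt value
instance (value : String) (out : Bool) : Decidable (Spec_contains_blocked_dunder_py value out) := by unfold Spec_contains_blocked_dunder_py; infer_instance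

-- ===== CLAIM (what is proved, stated in full; the proofs are below) =====
def Claim_equal_contains_blocked_dunder_py : Prop := ∀ (value : String), Dom_contains_blocked_dunder_py value → Spec_contains_blocked_dunder_py value (contains_blocked_dunder_py value)

-- ===== LEMMAS AND PROOFS =====

-- the 22 blocked names are pairwise distinct, so the set literal keeps them all in order
lemma pvSet_ofList_blocked : PySem.Set.ofList pvBlockedNames = pvBlockedNames := by rfl

-- for a nonempty pattern, scanning the positions 0..len-1 for a prefix match
-- is the same as the substring test
lemma pvRange_any_prefix (b l : List Char) (hb : b ≠ []) :
    ((List.range l.length).any fun i => PySem.Chars.startswith (l.drop i) b)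
      = PySem.Chars.isIn b l := by
  by_cases h : PySem.Chars.isIn b l = true
  · rw [h]
    obtain ⟨j, hj⟩ := (PySem.Chars.exists_prefix_drop_iff_isIn b l).mpr h
    have hjlt : j < l.length := by
      by_contra hge
      have : l.drop j = [] := List.drop_eq_nil_of_le (le_of_not_gt hge)
      rw [this] at hj
      exact hb (List.prefix_nil.mp hj)
    refine List.any_eq_true.mpr ⟨j, List.mem_range.mpr hjlt, ?_⟩
    exact (PySem.Chars.startswith_iff _ _).mpr hj
  · rw [Bool.eq_false_iff.mpr h, List.any_eq_false]
    intro i _ hpref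
    exact h ((PySem.Chars.exists_prefix_drop_iff_isIn b l).mp
      ⟨i, (PySem.Chars.startswith_iff _ _).mp hpref⟩)

-- swap the two `any`s
lemma pvAny_swap {α β : Type} (l : List α) (m : List β) (f : α → β → Bool) :
    (l.any fun x => m.any fun y => f x y) = (m.any fun y => l.any fun x => f x y) := by
  rw [Bool.eq_iff_iff]
  simp only [List.any_eq_true]
  tauto

lemma pvAny_congr {α : Type} (l : List α) (f g : α → Bool) (h : ∀ x ∈ l, f x = g x) :
    l.any f = l.any g := by
  induction l with
  | nil => rfl
  | cons a t ih =>
    simp only [List.any_cons, h a (List.mem_cons_self ..),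
      ih (fun x hx => h x (List.mem_cons_of_mem _ hx))]

lemma pvBlocked_ne_nil : ∀ b ∈ pvBlockedAlt, b ≠ [] := by decide

-- ===== VERDICT (by name: the statement is the Claim_ definition above) =====
theorem contains_blocked_dunder_py_spec : Claim_equal_contains_blocked_dunder_py := by
  intro value _
  unfold Spec_contains_blocked_dunder_py contains_blocked_dunder_py contains_blocked_dunder_py_alt
  rw [pvSet_ofList_blocked, pvAny_swap]
  unfold pvBlockedAlt
  rw [List.any_map]
  apply pvAny_congr
  intro b hb
  have hb' : b.toList ≠ [] := pvBlocked_ne_nil b.toList (List.mem_map_of_mem hb)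
  simp only [Function.comp]
  rw [pvRange_any_prefix _ _ hb']
  simp [PySem.Str.isIn_eq]
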